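-- pv_equiv track=rewrite | github.com/tsurukai3005/3gpp-research | tools/pptx/pptx_builder.py | _parse_inline_emphasis
-- ===== SOURCE A (Python) =====
-- def _parse_inline_emphasis(text: str) -> list[tuple[str, bool]]:
--     """`**strong**` を抽出して (segment, is_emph) のリストにする。"""
--     out: list[tuple[str, bool]] = []
--     i = 0
--     while i < len(text):
--         idx = text.find("**", i)
--         if idx == -1:
--             tail = text[i:]
--             if tail:
--                 out.append((tail, False))
--             break
--         if idx > i:
--             out.append((text[i:idx], False))
--         end = text.find("**", idx + 2)
--         if end == -1:
--             tail = text[idx:]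
--             if tail:
--                 out.append((tail, False))
--             break
--         seg = text[idx + 2:end]
--         if seg:
--             out.append((seg, True))
--         i = end + 2
--     return out
-- ===== SOURCE B (Python) =====
-- def _parse_inline_emphasis(text: str) -> list[tuple[str, bool]]:
--     """Split once on '**', then consume tokens pairwise: plain token, emphasized token.
--     A lone trailing token after an unmatched '**' is re-emitted as '**'+token, plain."""
--     return _emit(text.split("**"))
--
--
-- def _emit(tokens: list[str]) -> list[tuple[str, bool]]:
--     if len(tokens) == 1:
--         return [(tokens[0], False)] if tokens[0] else []
--     head = [(tokens[0], False)] if tokens[0] else []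
--     if len(tokens) == 2:
--         return head + [("**" + tokens[1], False)]
--     mid = [(tokens[1], True)] if tokens[1] else []
--     return head + mid + _emit(tokens[2:])
-- ===== Notes on version B (the rewrite author's own statement) =====
-- stated objective: simpler
-- what changed: Replaces the manual find/pointer scan with a single split on '**' followed by a pairwise recursion over the token list (plain token, emphasized token; an unmatched trailing token is re-emitted with its '**' prefix).
import Mathlib
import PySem

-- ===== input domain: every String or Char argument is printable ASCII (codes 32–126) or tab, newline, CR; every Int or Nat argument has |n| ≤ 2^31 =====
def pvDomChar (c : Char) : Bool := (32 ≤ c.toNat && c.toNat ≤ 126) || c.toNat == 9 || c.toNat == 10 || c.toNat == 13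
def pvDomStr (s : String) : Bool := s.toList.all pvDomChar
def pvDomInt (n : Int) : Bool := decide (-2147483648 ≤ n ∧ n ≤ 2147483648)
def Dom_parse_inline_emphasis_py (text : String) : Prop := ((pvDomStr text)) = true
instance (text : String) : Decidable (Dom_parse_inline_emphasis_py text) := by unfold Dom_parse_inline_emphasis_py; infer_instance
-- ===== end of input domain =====

-- B replaces A's manual find/pointer scan with one split on "**" and a pairwise recursion
-- over the token list (objective: simpler).

-- ===== PORT A =====
-- index of the first occurrence of "**" (Python text.find("**", i), expressed on the suffix text[i:])
def findSS : List Char → Option Nat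
  | '*' :: '*' :: _ => some 0
  | _ :: rest => (findSS rest).map (· + 1)
  | [] => none

theorem findSS_le {s : List Char} {i : Nat} (h : findSS s = some i) : i + 2 ≤ s.length := by
  fun_induction findSS s generalizing i with
  | case1 => simp_all; omega
  | case2 _ rest _ ih =>
    simp only [Option.map_eq_some_iff] at h
    obtain ⟨j, hj, rfl⟩ := h
    have := ih hj
    simp [List.length_cons]; omega
  | case3 => simp_all [findSS]

-- A's while-loop, as recursion on the remaining suffix s = text[i:] (same state, same branch order)
def loopA (s : List Char) : List (String × Bool) :=
  if hs : s = [] then []        -- while i < len(text)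
  else
    match hf : findSS s with
    | none => [(String.ofList s, false)]               -- idx == -1: tail (nonempty since s ≠ [])
    | some idx =>
      let pre := if 0 < idx then [(String.ofList (s.take idx), false)] else []
      match findSS (s.drop (idx + 2)) with
      | none => pre ++ [(String.ofList (s.drop idx), false)]   -- end == -1: tail = text[idx:]
      | some e =>
        let seg := (s.drop (idx + 2)).take e
        pre ++ (if seg ≠ [] then [(String.ofList seg, true)] else []) ++ loopA (s.drop (idx + 2 + e + 2))
termination_by s.length
decreasing_by
  have h1 := findSS_le hf
  have h2 : s.length ≠ 0 := by simpa using hs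
  simp [List.length_drop]; omega

def parse_inline_emphasis_py (text : String) : List (String × Bool) := loopA text.toList

-- ===== PORT B =====
-- text.split("**") on char lists
def splitSS : List Char → List (List Char)
  | '*' :: '*' :: rest => [] :: splitSS rest
  | c :: rest =>
    match splitSS rest with
    | t :: ts => (c :: t) :: ts
    | [] => [[c]]
  | [] => [[]]

-- _emit: pairwise recursion over the token list
def emitB : List (List Char) → List (String × Bool)
  | [] => []
  | [t] => if t ≠ [] then [(String.ofList t, false)] else []
  | t :: u :: ts =>
    let head := if t ≠ [] then [(String.ofList t, false)] else []
    match ts with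
    | [] => head ++ [(String.ofList ('*' :: '*' :: u), false)]
    | _ => head ++ (if u ≠ [] then [(String.ofList u, true)] else []) ++ emitB ts

def parse_inline_emphasis_py_alt (text : String) : List (String × Bool) := emitB (splitSS text.toList)

-- ===== PRECONDITION & SPEC =====
def Spec_parse_inline_emphasis_py (text : String) (out : List (String × Bool)) : Prop := out = parse_inline_emphasis_py_alt text
instance (text : String) (out : List (String × Bool)) : Decidable (Spec_parse_inline_emphasis_py text out) := by unfold Spec_parse_inline_emphasis_py; infer_instance

-- ===== CLAIM (what is proved, stated in full; the proofs are below) =====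
def Claim_equal_parse_inline_emphasis_py : Prop := ∀ (text : String), Dom_parse_inline_emphasis_py text → Spec_parse_inline_emphasis_py text (parse_inline_emphasis_py text)

-- ===== LEMMAS AND PROOFS =====

theorem splitSS_of_findSS_none {s : List Char} (h : findSS s = none) : splitSS s = [s] := by
  fun_induction splitSS s <;> simp_all [findSS]

theorem splitSS_ne_nil (s : List Char) : splitSS s ≠ [] := by
  fun_induction splitSS s <;> simp_all

theorem findSS_cons {c : Char} {rest : List Char}
    (hne : ∀ (tail : List Char), c = '*' → rest = '*' :: tail → False) :
    findSS (c :: rest) = (findSS rest).map (· + 1) := by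
  rw [findSS.eq_def]
  split
  · rename_i tail heq
    injection heq with hc hr
    exact (hne tail hc hr).elim
  · rename_i heq
    injection heq with h1 h2
    subst h1; subst h2; rfl
  · rename_i heq; simp at heq

theorem splitSS_of_findSS_some {s : List Char} {i : Nat} (h : findSS s = some i) :
    splitSS s = s.take i :: splitSS (s.drop (i + 2)) ∧ s.drop i = '*' :: '*' :: s.drop (i + 2) := by
  fun_induction splitSS s generalizing i with
  | case1 rest =>
    have hi : i = 0 := by simpa [findSS] using h.symm
    subst hi
    simp
  | case2 c rest hne t ts hsplit ih =>
    rw [findSS_cons hne] at h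
    simp only [Option.map_eq_some_iff] at h
    obtain ⟨j, hj, rfl⟩ := h
    obtain ⟨ih1, ih2⟩ := ih hj
    rw [hsplit] at ih1
    injection ih1 with e1 e2
    constructor
    · simp only [List.take_succ_cons, List.drop_succ_cons, e1, ← e2,
        show j + 1 + 2 = (j + 2) + 1 from by ring]
    · simp only [List.drop_succ_cons, show j + 1 + 2 = (j + 2) + 1 by ring]
      exact ih2
  | case3 c rest hne hsplit ih =>
    exact absurd hsplit (splitSS_ne_nil rest)
  | case4 =>
    simp [findSS] at h

theorem take_ne_nil_iff {s : List Char} {i : Nat} (hs : s ≠ []) : (s.take i ≠ []) ↔ 0 < i := by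
  cases s <;> cases i <;> simp_all

theorem loopA_eq_emitB (s : List Char) : loopA s = emitB (splitSS s) := by
  fun_induction loopA s with
  | case1 => simp [splitSS, emitB]
  | case2 s hs hf =>
    rw [splitSS_of_findSS_none hf]
    simp [emitB, hs]
  | case3 s hs idx hf pre hnone =>
    obtain ⟨h1, h2⟩ := splitSS_of_findSS_some hf
    rw [h1, splitSS_of_findSS_none hnone]
    simp only [emitB, pre, h2, dite_eq_ite]
    rw [if_congr ((take_ne_nil_iff hs).symm : (0 < idx) ↔ _) rfl rfl]
  | case4 s hs idx hf pre e hsome seg ih =>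
    obtain ⟨h1, h2⟩ := splitSS_of_findSS_some hf
    obtain ⟨h3, _⟩ := splitSS_of_findSS_some hsome
    rw [h1, h3]
    obtain ⟨x, xs, hx⟩ : ∃ x xs, splitSS ((s.drop (idx + 2)).drop (e + 2)) = x :: xs := by
      cases hc : splitSS ((s.drop (idx + 2)).drop (e + 2)) with
      | nil => exact absurd hc (splitSS_ne_nil _)
      | cons x xs => exact ⟨x, xs, rfl⟩
    rw [hx]
    have hdd : (s.drop (idx + 2)).drop (e + 2) = s.drop (idx + 2 + e + 2) := by
      rw [List.drop_drop]; ring_nf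
    rw [hdd] at hx
    simp only [emitB, pre, seg]
    rw [ih, hx]

    simp only [dite_eq_ite]
    rw [if_congr ((take_ne_nil_iff hs).symm : (0 < idx) ↔ _) rfl rfl]

-- ===== VERDICT (by name: the statement is the Claim_ definition above) =====
theorem parse_inline_emphasis_py_spec : Claim_equal_parse_inline_emphasis_py := by
  intro text _
  unfold Spec_parse_inline_emphasis_py parse_inline_emphasis_py parse_inline_emphasis_py_alt
  exact loopA_eq_emitB text.toList
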